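-- pv_equiv track=rewrite | github.com/bamboosingsinwind/interview | interview_code/python/huawei0510-1.py | check
-- ===== SOURCE A (Python) =====
-- def check(st,i):
--     if len(st)==0:
--         return st,i
--     else:
--         # su = sum(st) ##########时间复杂度优化
--         # for j in range(len(st)):
--         #     if i == su:
--         #         st = st[:j]
--         #         i = i*2
--         #         break
--         #     su -= st[j] #############时间复杂度优化，要放到下面
--
--         for j in range(len(st)):
--             if i == sum(st[j:]):
--                 st = st[:j]
--                 i = i*2
--                 break
--     return st,i
-- ===== SOURCE B (Python) =====
-- def check(st, i):
--     su = sum(st)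
--     for j in range(len(st)):
--         if su == i:
--             return st[:j], i * 2
--         su -= st[j]
--     return st, i
-- ===== Notes on version B (the rewrite author's own statement) =====
-- stated objective: faster
-- what changed: Instead of recomputing sum(st[j:]) from scratch for every j (nested scan), B computes the total once and decrements a running suffix sum while scanning, returning as soon as it equals i.
import Mathlib
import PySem

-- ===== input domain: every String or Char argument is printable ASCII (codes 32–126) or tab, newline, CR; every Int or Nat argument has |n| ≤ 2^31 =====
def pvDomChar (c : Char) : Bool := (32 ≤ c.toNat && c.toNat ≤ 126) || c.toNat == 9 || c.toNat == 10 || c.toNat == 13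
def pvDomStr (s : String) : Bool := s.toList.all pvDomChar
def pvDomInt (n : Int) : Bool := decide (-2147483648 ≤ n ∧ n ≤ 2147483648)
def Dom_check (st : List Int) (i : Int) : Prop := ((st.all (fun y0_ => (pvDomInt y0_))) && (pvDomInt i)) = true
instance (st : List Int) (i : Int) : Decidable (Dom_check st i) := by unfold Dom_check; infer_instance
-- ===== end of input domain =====

-- B replaces A's per-index recomputation of sum(st[j:]) by a single running suffix sum, decremented as the scan advances (O(n) instead of O(n^2)).

-- ===== PORT A =====
-- the 'for j in range(len(st))' loop with break: recursion over the index list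
def checkGoA (st : List Int) (i : Int) : List Int → List Int × Int
  | [] => (st, i)
  | j :: js =>
    if i = (PySem.List.slice st (some j) none).sum then
      (PySem.List.slice st none (some j), i * 2)
    else checkGoA st i js

def check (st : List Int) (i : Int) : List Int × Int :=
  if st.length == 0 then (st, i)
  else checkGoA st i (PySem.List.pyRange 0 (st.length : Int) 1)

-- ===== PORT B =====
-- B's loop: walk the list once carrying the running suffix sum su and the index j
def checkGoB (st : List Int) (i : Int) : Int → Nat → List Int → List Int × Int
  | _, _, [] => (st, i)
  | su, j, x :: rest =>
    if su = i then (st.take j, i * 2)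
    else checkGoB st i (su - x) (j + 1) rest

def check_alt (st : List Int) (i : Int) : List Int × Int :=
  checkGoB st i st.sum 0 st

-- ===== PRECONDITION & SPEC =====
def Spec_check (st : List Int) (i : Int) (out : List Int × Int) : Prop := out = check_alt st i
instance (st : List Int) (i : Int) (out : List Int × Int) : Decidable (Spec_check st i out) := by unfold Spec_check; infer_instance

-- ===== CLAIM (what is proved, stated in full; the proofs are below) =====
def Claim_equal_check : Prop := ∀ (st : List Int) (i : Int), Dom_check st i → Spec_check st i (check st i)

-- ===== LEMMAS AND PROOFS =====

-- loop correspondence: A's scan from index j equals B's scan over the suffix st.drop j carrying its sum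
theorem goA_eq_goB (st : List Int) (i : Int) :
    ∀ (suf : List Int) (j : Nat), st.drop j = suf →
      checkGoA st i (PySem.List.pyRange (j : Int) (st.length : Int) 1)
        = checkGoB st i suf.sum j suf := by
  intro suf
  induction suf with
  | nil =>
      intro j hdrop
      have hlen : st.length ≤ j := by
        by_contra h
        have := List.drop_eq_nil_iff.mp hdrop
        omega
      rw [PySem.List.pyRange_one_eq_nil (by exact_mod_cast hlen)]
      simp [checkGoA, checkGoB]
  | cons x rest ih =>
      intro j hdrop
      have hj : j < st.length := by
        by_contra h
        have : st.drop j = [] := List.drop_eq_nil_iff.mpr (by omega)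
        simp [this] at hdrop
      rw [PySem.List.pyRange_one_cons (by exact_mod_cast hj)]
      have hslice_from : PySem.List.slice st (some (j : Int)) none = x :: rest := by
        rw [PySem.List.slice_from_natCast]; exact hdrop
      have hslice_to : PySem.List.slice st none (some (j : Int)) = st.take j :=
        PySem.List.slice_to_natCast st j
      simp only [checkGoA, checkGoB, hslice_from, hslice_to, List.sum_cons]
      by_cases hc : i = x + rest.sum
      · rw [if_pos hc, if_pos hc.symm]
      · rw [if_neg hc, if_neg (fun h => hc h.symm)]
        have hrest : st.drop (j + 1) = rest := by
          rw [← List.drop_drop]  -- drop 1 (drop j st)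
          simp [hdrop]
        have := ih (j + 1) hrest
        have hcast : (j : Int) + 1 = ((j + 1 : Nat) : Int) := by push_cast; ring
        rw [hcast, this]
        congr 1
        ring

-- ===== VERDICT (by name: the statement is the Claim_ definition above) =====
theorem check_spec : Claim_equal_check := by
  intro st i _
  unfold Spec_check check check_alt
  by_cases h : st.length = 0
  · have hnil : st = [] := List.length_eq_zero_iff.mp h
    simp [hnil, checkGoB]
  · rw [if_neg (by simpa using h)]
    have := goA_eq_goB st i st 0 (by simp)
    simpa using this
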